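-- pv_equiv track=rewrite | github.com/DanBickelhaupt/GoogleColab | get_comfort_info.py | remove_bracket_text
-- ===== SOURCE A (Python) =====
-- def remove_bracket_text(string):
--     start = []
--     stop = []
--     removal_pair = []
--     out = string
--     for i, letter in enumerate(string):
--         if letter == '<':
--             start = i
--         if letter == '>':
--             stop = i
--         if (start != []) and (stop != []):
--             removal_pair.append((start, stop))
--             start = []
--             stop = []
--     if len(removal_pair) > 0:
--         idx_adjust = 0
--         for pair in removal_pair:
--             out = out[:pair[0]-idx_adjust] + " " + out[pair[1]-idx_adjust+1:]
--             idx_adjust += pair[1] - pair[0]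
--     return out
-- ===== SOURCE B (Python) =====
-- def remove_bracket_text(string):
--     out = []
--     buf = None  # buffered characters after an open '<', or None if no segment is open
--     for c in string:
--         if c == '<':
--             if buf is not None:
--                 out.append('<')
--                 out.extend(buf)
--             buf = []
--         elif c == '>':
--             if buf is not None:
--                 out.append(' ')
--                 buf = None
--             else:
--                 out.append('>')
--         elif buf is not None:
--             buf.append(c)
--         else:
--             out.append(c)
--     if buf is not None:
--         out.append('<')
--         out.extend(buf)
--     return ''.join(out)
-- ===== Notes on version B (the rewrite author's own statement) =====
-- stated objective: alternative
-- what changed: B replaces A's two-phase algorithm (collect (start,stop) index pairs over enumerate, then repeatedly re-splice the string with an idx_adjust offset) by a single left-to-right pass with a pending-segment buffer that copies characters and emits one space per closed bracket segment, so no index list and no per-pair string splicing.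
-- intended difference: On strings whose bracket subsequence begins with a close bracket immediately followed by an open bracket, or contains two consecutive close brackets followed by an open bracket (i.e. a stray close bracket gets paired by A with an open bracket to its right), A forms a reversed index pair and its splice arithmetic duplicates part of the text and inserts a space, while B leaves the unmatched brackets intact and returns the text unchanged there, which is the intended removal behaviour (see the pinned witness). — e.g. on remove_bracket_text("><a"): A returns "> <a", B returns "><a"
import Mathlib
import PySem

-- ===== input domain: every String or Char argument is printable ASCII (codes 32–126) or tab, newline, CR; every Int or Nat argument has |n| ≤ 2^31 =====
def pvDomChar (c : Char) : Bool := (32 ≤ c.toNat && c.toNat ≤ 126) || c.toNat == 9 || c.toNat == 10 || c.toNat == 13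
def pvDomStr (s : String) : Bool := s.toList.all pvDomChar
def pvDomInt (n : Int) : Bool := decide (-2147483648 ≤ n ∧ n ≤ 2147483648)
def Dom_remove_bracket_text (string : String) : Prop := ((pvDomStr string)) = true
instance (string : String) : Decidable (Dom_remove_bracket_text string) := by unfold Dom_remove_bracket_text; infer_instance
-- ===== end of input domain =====

-- B replaces A's collect-index-pairs-then-resplice algorithm by a single left-to-right pass with a
-- pending-segment buffer; on strings where a stray close bracket precedes a later open bracket,
-- A's reversed pair duplicates text and B instead leaves the unmatched brackets intact (see D_ below).

-- ===== PORT A =====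
-- A's enumerate loop: start/stop are Python's []-or-index as Option Int; removal_pair built in order
def pvPairsGo (start stop : Option Int) (i : Int) : List Char → List (Int × Int)
  | [] => []
  | c :: cs =>
    let start' := if c = '<' then some i else start
    let stop'  := if c = '>' then some i else stop
    if start'.isSome && stop'.isSome then
      (start'.get!, stop'.get!) :: pvPairsGo none none (i + 1) cs
    else
      pvPairsGo start' stop' (i + 1) cs

-- A's second loop: out = out[:pair[0]-idx_adjust] + " " + out[pair[1]-idx_adjust+1:]
def pvSpliceGo (out : List Char) (adj : Int) : List (Int × Int) → List Char
  | [] => out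
  | (a, b) :: ps =>
      pvSpliceGo (PySem.List.slice out none (some (a - adj)) ++ [' ']
                    ++ PySem.List.slice out (some (b - adj + 1)) none)
                 (adj + (b - a)) ps

def remove_bracket_text (string : String) : String :=
  let cs := string.toList
  let removal_pair := pvPairsGo none none 0 cs
  let out := if removal_pair.length > 0 then pvSpliceGo cs 0 removal_pair else cs
  String.ofList out

-- ===== PORT B =====
-- Source B's loop body: state = (out, buf); buf = some b ↔ a '<' is open with buffered chars b
def pvStep (st : List Char × Option (List Char)) (c : Char) : List Char × Option (List Char) :=
  if c = '<' then
    match st.2 with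
    | some b => (st.1 ++ '<' :: b, some [])
    | none => (st.1, some [])
  else if c = '>' then
    match st.2 with
    | some _ => (st.1 ++ [' '], none)
    | none => (st.1 ++ ['>'], none)
  else
    match st.2 with
    | some b => (st.1, some (b ++ [c]))
    | none => (st.1 ++ [c], none)

-- Source B's final flush of a still-open segment
def pvFlush (st : List Char × Option (List Char)) : List Char :=
  match st.2 with
  | some b => st.1 ++ '<' :: b
  | none => st.1

def remove_bracket_text_alt (string : String) : String :=
  String.ofList (pvFlush (string.toList.foldl pvStep ([], none)))

-- ===== PRECONDITION & SPEC =====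
def pvBrackets (l : List Char) : List Char := l.filter (fun c => c = '<' || c = '>')

-- On strings whose bracket subsequence begins with a close-then-open bracket or contains two close
-- brackets followed by an open bracket (a stray close bracket later paired by A with an open bracket
-- to its right), A forms a reversed index pair whose splice duplicates part of the text and inserts
-- a space; B leaves the unmatched brackets intact, the intended behaviour (see the witness below).
def D_remove_bracket_text (string : String) : Prop :=
  ['>', '<'] <+: pvBrackets string.toList ∨ ['>', '>', '<'] <:+: pvBrackets string.toList
instance (string : String) : Decidable (D_remove_bracket_text string) := by
  unfold D_remove_bracket_text; infer_instance

def Spec_remove_bracket_text (string : String) (out : String) : Prop :=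
  ¬ D_remove_bracket_text string → out = remove_bracket_text_alt string
instance (string : String) (out : String) : Decidable (Spec_remove_bracket_text string out) := by
  unfold Spec_remove_bracket_text; infer_instance

def pvDiffWitness_remove_bracket_text : String := "><a"
def pvDiffWitnessOut_remove_bracket_text : String × String := ("> <a", "><a")

-- ===== CLAIM (what is proved, stated in full; the proofs are below) =====
def Claim_unchanged_remove_bracket_text : Prop := ∀ (string : String), Dom_remove_bracket_text string → Spec_remove_bracket_text string (remove_bracket_text string)
def Claim_changed_remove_bracket_text : Prop := Dom_remove_bracket_text (pvDiffWitness_remove_bracket_text) ∧ D_remove_bracket_text (pvDiffWitness_remove_bracket_text) ∧ remove_bracket_text (pvDiffWitness_remove_bracket_text) = pvDiffWitnessOut_remove_bracket_text.1 ∧ remove_bracket_text_alt (pvDiffWitness_remove_bracket_text) = pvDiffWitnessOut_remove_bracket_text.2 ∧ pvDiffWitnessOut_remove_bracket_text.1 ≠ pvDiffWitnessOut_remove_bracket_text.2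

-- ===== LEMMAS AND PROOFS =====

-- the bad-input condition at list level
def pvBadL (l : List Char) : Prop :=
  ['>', '<'] <+: pvBrackets l ∨ ['>', '>', '<'] <:+: pvBrackets l

-- ---- bracket-subsequence bookkeeping ----
theorem pvBrackets_cons_nb {c : Char} (l : List Char) (h1 : c ≠ '<') (h2 : c ≠ '>') :
    pvBrackets (c :: l) = pvBrackets l := by
  simp [pvBrackets, h1, h2]

theorem pvBrackets_cons_lt (l : List Char) : pvBrackets ('<' :: l) = '<' :: pvBrackets l := by
  simp [pvBrackets]

theorem pvBrackets_cons_gt (l : List Char) : pvBrackets ('>' :: l) = '>' :: pvBrackets l := by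
  simp [pvBrackets]

theorem pvBrackets_append (u v : List Char) :
    pvBrackets (u ++ v) = pvBrackets u ++ pvBrackets v := by
  simp [pvBrackets, List.filter_append]

theorem pvBrackets_none (m : List Char) (h : ∀ c ∈ m, c ≠ '<' ∧ c ≠ '>') :
    pvBrackets m = [] := by
  simp only [pvBrackets, List.filter_eq_nil_iff]
  intro c hc
  simp [(h c hc).1, (h c hc).2]

theorem pvBad_gt_aux : ∀ (t : List Char), (∀ c ∈ t, c = '<' ∨ c = '>') → '<' ∈ t →
    (['>', '<'] <+: ('>' :: t) ∨ ['>', '>', '<'] <:+: ('>' :: t)) := by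
  intro t
  induction t with
  | nil => intro _ h; simp at h
  | cons c t ih =>
    intro hall hmem
    by_cases hc : c = '<'
    · subst hc
      exact Or.inl ⟨t, rfl⟩
    · have hgt : c = '>' := by
        rcases hall c (by simp) with h | h
        · exact absurd h hc
        · exact h
      subst hgt
      have hm : '<' ∈ t := by
        rcases List.mem_cons.mp hmem with h | h
        · exact absurd h.symm hc
        · exact h
      rcases ih (fun x hx => hall x (by simp [hx])) hm with h | h
      · rcases h with ⟨s, hs⟩
        refine Or.inr ⟨[], s, ?_⟩
        simp only [List.nil_append]
        rw [← hs]
        rfl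
      · exact Or.inr (h.trans (List.suffix_cons '>' ('>' :: t)).isInfix)

theorem pvBad_gt {r : List Char} (h : ¬ pvBadL ('>' :: r)) : '<' ∉ r := by
  intro hmem
  apply h
  have hb : '<' ∈ pvBrackets r := by
    simp [pvBrackets, List.mem_filter, hmem]
  have hall : ∀ c ∈ pvBrackets r, c = '<' ∨ c = '>' := by
    intro c hc
    have := List.of_mem_filter hc
    simpa using this
  have := pvBad_gt_aux (pvBrackets r) hall hb
  simpa [pvBadL, pvBrackets_cons_gt] using this

theorem pvBad_nb {c : Char} {r : List Char} (h : ¬ pvBadL (c :: r)) (h1 : c ≠ '<') (h2 : c ≠ '>') :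
    ¬ pvBadL r := by
  simpa [pvBadL, pvBrackets_cons_nb r h1 h2] using h

theorem pvBad_split {u m v : List Char} (hm : ∀ c ∈ m, c ≠ '<' ∧ c ≠ '>')
    (h : ¬ pvBadL (u ++ '<' :: (m ++ '>' :: v))) : ¬ pvBadL v := by
  intro hv
  apply h
  have hbr : pvBrackets (u ++ '<' :: (m ++ '>' :: v))
      = pvBrackets u ++ '<' :: '>' :: pvBrackets v := by
    rw [pvBrackets_append, pvBrackets_cons_lt, pvBrackets_append, pvBrackets_none m hm,
      pvBrackets_cons_gt]
    simp
  rcases hv with hp | hi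
  · rcases hp with ⟨s, hs⟩
    refine Or.inr ⟨pvBrackets u ++ ['<'], s, ?_⟩
    rw [hbr, ← hs]
    simp
  · refine Or.inr (hi.trans ?_)
    refine ⟨pvBrackets u ++ ['<', '>'], [], ?_⟩
    rw [hbr]
    simp

-- ---- first/last occurrence decompositions ----
theorem pvFirstGt : ∀ (r : List Char), '>' ∈ r → ∃ x y, r = x ++ '>' :: y ∧ '>' ∉ x := by
  intro r
  induction r with
  | nil => intro h; simp at h
  | cons c r ih =>
    intro hmem
    by_cases hc : c = '>'
    · exact ⟨[], r, by simp [hc], by simp⟩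
    · have hr : '>' ∈ r := by
        rcases List.mem_cons.mp hmem with h | h
        · exact absurd h.symm hc
        · exact h
      rcases ih hr with ⟨x, y, hxy, hx⟩
      refine ⟨c :: x, y, by simp [hxy], ?_⟩
      intro hmem2
      rcases List.mem_cons.mp hmem2 with h | h
      · exact hc h.symm
      · exact hx h

theorem pvLastLt : ∀ (x : List Char), ∃ u m, '<' :: x = u ++ '<' :: m ∧ '<' ∉ m := by
  have aux : ∀ (x : List Char), '<' ∈ x → ∃ u m, x = u ++ '<' :: m ∧ '<' ∉ m := by
    intro x
    induction x with
    | nil => intro h; simp at h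
    | cons c x ih =>
      intro hmem
      by_cases hx : '<' ∈ x
      · rcases ih hx with ⟨u, m, hum, hm⟩
        exact ⟨c :: u, m, by simp [hum], hm⟩
      · have hc : c = '<' := by
          rcases List.mem_cons.mp hmem with h | h
          · exact h.symm
          · exact absurd h hx
        exact ⟨[], x, by simp [hc], hx⟩
  intro x
  by_cases hx : '<' ∈ x
  · rcases aux x hx with ⟨u, m, hum, hm⟩
    exact ⟨'<' :: u, m, by rw [hum]; rfl, hm⟩
  · exact ⟨[], x, rfl, hx⟩

-- ---- pvPairsGo facts ----
theorem pvPairs_noGt : ∀ (l : List Char) (s : Option Int) (i : Int), '>' ∉ l →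
    pvPairsGo s none i l = [] := by
  intro l
  induction l with
  | nil => intro s i _; simp [pvPairsGo]
  | cons c l ih =>
    intro s i h
    have hc : c ≠ '>' := fun hc => h (by simp [hc])
    have hl : '>' ∉ l := fun hl => h (by simp [hl])
    by_cases hlt : c = '<' <;> simp [pvPairsGo, hlt, hc, ih _ _ hl]

theorem pvPairs_noLt : ∀ (l : List Char) (p : Option Int) (i : Int), '<' ∉ l →
    pvPairsGo none p i l = [] := by
  intro l
  induction l with
  | nil => intro p i _; simp [pvPairsGo]
  | cons c l ih =>
    intro p i h
    have hc : c ≠ '<' := fun hc => h (by simp [hc])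
    have hl : '<' ∉ l := fun hl => h (by simp [hl])
    by_cases hgt : c = '>' <;> simp [pvPairsGo, hgt, hc, ih _ _ hl]

theorem pvPairs_thruU : ∀ (u : List Char) (r : List Char) (s : Option Int) (i : Int), '>' ∉ u →
    pvPairsGo s none i (u ++ '<' :: r)
      = pvPairsGo (some (i + u.length)) none (i + u.length + 1) r := by
  intro u
  induction u with
  | nil => intro r s i _; simp [pvPairsGo]
  | cons c u ih =>
    intro r s i h
    have hc : c ≠ '>' := fun hc => h (by simp [hc])
    have hu : '>' ∉ u := fun hl => h (by simp [hl])
    have h1 : i + 1 + (u.length : Int) = i + (u.length + 1 : Nat) := by push_cast; ring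
    have h2 : i + 1 + (u.length : Int) + 1 = i + (u.length + 1 : Nat) + 1 := by push_cast; ring
    by_cases hlt : c = '<' <;>
      simp [pvPairsGo, hlt, hc, ih r _ (i + 1) hu, h1]

theorem pvPairs_thruM : ∀ (m : List Char) (r : List Char) (a i : Int),
    (∀ c ∈ m, c ≠ '<' ∧ c ≠ '>') →
    pvPairsGo (some a) none i (m ++ r) = pvPairsGo (some a) none (i + m.length) r := by
  intro m
  induction m with
  | nil => intro r a i _; simp
  | cons c m ih =>
    intro r a i h
    have hc := h c (by simp)
    have h1 : i + 1 + (m.length : Int) = i + (m.length + 1 : Nat) := by push_cast; ring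
    simp [pvPairsGo, hc.1, hc.2, ih r a (i + 1) (fun x hx => h x (by simp [hx])), h1]

theorem pvPairs_emit (v : List Char) (a i : Int) :
    pvPairsGo (some a) none i ('>' :: v) = (a, i) :: pvPairsGo none none (i + 1) v := by
  simp [pvPairsGo]

theorem pvPairs_shift : ∀ (l : List Char) (s p : Option Int) (i k : Int),
    pvPairsGo (s.map (· + k)) (p.map (· + k)) (i + k) l
      = (pvPairsGo s p i l).map (fun ab => (ab.1 + k, ab.2 + k)) := by
  intro l
  induction l with
  | nil => intro s p i k; simp [pvPairsGo]
  | cons c l ih =>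
    intro s p i k
    have h1 : i + 1 + k = (i + k) + 1 := by ring
    by_cases hlt : c = '<' <;> by_cases hgt : c = '>' <;>
      cases s <;> cases p <;>
        simp [pvPairsGo, hlt, hgt, ← ih, h1]

theorem pvPairs_shift0 (l : List Char) (k : Int) :
    pvPairsGo none none k l = (pvPairsGo none none 0 l).map (fun ab => (ab.1 + k, ab.2 + k)) := by
  have := pvPairs_shift l none none 0 k
  simpa using this

-- ---- B-side (fold) facts ----
theorem pvStep_lt (st : List Char × Option (List Char)) :
    pvStep st '<' = (pvFlush st, some []) := by
  obtain ⟨out, buf⟩ := st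
  cases buf <;> simp [pvStep, pvFlush]

theorem pvStep_front (out : List Char) (buf : Option (List Char)) (c : Char) :
    pvStep (out, buf) c = (out ++ (pvStep ([], buf) c).1, (pvStep ([], buf) c).2) := by
  by_cases hlt : c = '<' <;> by_cases hgt : c = '>' <;>
    cases buf <;> simp [pvStep, hlt, hgt]

theorem pvFlush_front (a x : List Char) (b : Option (List Char)) :
    pvFlush (a ++ x, b) = a ++ pvFlush (x, b) := by
  cases b <;> simp [pvFlush]

theorem pvFold_front : ∀ (l : List Char) (out : List Char) (buf : Option (List Char)),
    l.foldl pvStep (out, buf)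
      = (out ++ (l.foldl pvStep ([], buf)).1, (l.foldl pvStep ([], buf)).2) := by
  intro l
  induction l with
  | nil => intro out buf; simp
  | cons c l ih =>
    intro out buf
    cases hX : pvStep ([], buf) c with
    | mk x1 x2 =>
      rw [List.foldl_cons, List.foldl_cons, pvStep_front, hX, ih x1 x2, ih (out ++ x1) x2]
      simp

theorem pvAlt_noGt : ∀ (l : List Char) (out : List Char) (buf : Option (List Char)), '>' ∉ l →
    pvFlush (l.foldl pvStep (out, buf)) = pvFlush (out, buf) ++ l := by
  intro l
  induction l with
  | nil => intro out buf _; simp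
  | cons c l ih =>
    intro out buf h
    have hc : c ≠ '>' := fun hc => h (by simp [hc])
    have hl : '>' ∉ l := fun hl => h (by simp [hl])
    by_cases hlt : c = '<'
    · subst hlt
      rw [List.foldl_cons, pvStep_lt, ih _ _ hl]
      simp [pvFlush]
    · cases buf with
      | none =>
        rw [List.foldl_cons, show pvStep (out, none) c = (out ++ [c], none) by
          simp [pvStep, hlt, hc], ih _ _ hl]
        simp [pvFlush]
      | some b =>
        rw [List.foldl_cons, show pvStep (out, some b) c = (out, some (b ++ [c])) by
          simp [pvStep, hlt, hc], ih _ _ hl]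
        simp [pvFlush]

theorem pvAlt_noLt : ∀ (l : List Char) (out : List Char), '<' ∉ l →
    l.foldl pvStep (out, none) = (out ++ l, none) := by
  intro l
  induction l with
  | nil => intro out _; simp
  | cons c l ih =>
    intro out h
    have hc : c ≠ '<' := fun hc => h (by simp [hc])
    have hl : '<' ∉ l := fun hl => h (by simp [hl])
    by_cases hgt : c = '>' <;> simp [List.foldl_cons, pvStep, hgt, hc, ih _ hl]

theorem pvAlt_thruM : ∀ (m : List Char) (out b : List Char),
    (∀ c ∈ m, c ≠ '<' ∧ c ≠ '>') →
    m.foldl pvStep (out, some b) = (out, some (b ++ m)) := by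
  intro m
  induction m with
  | nil => intro out b _; simp
  | cons c m ih =>
    intro out b h
    have hc := h c (by simp)
    simp [List.foldl_cons, pvStep, hc.1, hc.2,
      ih out (b ++ [c]) (fun x hx => h x (by simp [hx]))]

theorem pvAlt_split (u m v : List Char) (hu : '>' ∉ u) (hm : ∀ c ∈ m, c ≠ '<' ∧ c ≠ '>') :
    pvFlush ((u ++ '<' :: (m ++ '>' :: v)).foldl pvStep ([], none))
      = u ++ ' ' :: pvFlush (v.foldl pvStep ([], none)) := by
  rw [List.foldl_append, List.foldl_cons, pvStep_lt]
  have hfl : pvFlush (u.foldl pvStep ([], none)) = u := by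
    have := pvAlt_noGt u [] none hu
    simpa [pvFlush] using this
  rw [hfl, List.foldl_append, pvAlt_thruM m u [] hm, List.foldl_cons]
  have hstep : pvStep (u, some ([] ++ m)) '>' = (u ++ [' '], none) := by
    simp [pvStep]
  rw [hstep]
  cases hY : v.foldl pvStep ([], none) with
  | mk y1 y2 =>
    rw [pvFold_front v (u ++ [' ']) none, hY]
    simp only [pvFlush]
    cases y2 <;> simp

-- ---- the main equivalence ----
theorem main_lemma : ∀ (n : Nat) (l : List Char), l.length ≤ n → ¬ pvBadL l →
    ∀ (w : List Char) (adj : Int),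
      pvSpliceGo (w ++ l) adj ((pvPairsGo none none 0 l).map
          (fun ab => (ab.1 + ((w.length : Int) + adj), ab.2 + ((w.length : Int) + adj))))
        = w ++ pvFlush (l.foldl pvStep ([], none)) := by
  intro n
  induction n with
  | zero =>
    intro l hl _ w adj
    have hnil : l = [] := List.eq_nil_of_length_eq_zero (Nat.le_zero.mp hl)
    subst hnil
    simp [pvPairsGo, pvSpliceGo, pvFlush]
  | succ n ih =>
    intro l hl hbad w adj
    match l with
    | [] => simp [pvPairsGo, pvSpliceGo, pvFlush]
    | c :: r =>
      by_cases hlt : c = '<'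
      · subst hlt
        by_cases hg : '>' ∈ r
        · -- there is a matched pair: decompose
          obtain ⟨x, y, hxy, hx⟩ := pvFirstGt r hg
          obtain ⟨u, m, hum, hm0⟩ := pvLastLt x
          have hlEq : '<' :: r = u ++ '<' :: (m ++ '>' :: y) := by
            rw [hxy, show ('<' :: (x ++ '>' :: y)) = ('<' :: x) ++ '>' :: y from rfl, hum]
            simp
          have hsub : ∀ c ∈ u ++ '<' :: m, c ∈ '<' :: x := by
            intro c hc; rw [hum]; exact hc
          have hu : '>' ∉ u := by
            intro hmem
            have := hsub '>' (by simp [hmem])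
            rcases List.mem_cons.mp this with h | h
            · exact absurd h.symm (by decide)
            · exact hx h
          have hmm : ∀ c ∈ m, c ≠ '<' ∧ c ≠ '>' := by
            intro c hc
            refine ⟨fun h => hm0 (h ▸ hc), fun h => ?_⟩
            have := hsub c (by simp [hc])
            subst h
            rcases List.mem_cons.mp this with h | h
            · exact absurd h.symm (by decide)
            · exact hx h
          have hbady : ¬ pvBadL y := by
            rw [hlEq] at hbad
            exact pvBad_split hmm hbad
          have hleny : y.length ≤ n := by
            have h1 := congrArg List.length hlEq
            simp [List.length_append] at h1 hl
            omega
          -- the pair list (raw shape produced by the pvPairs lemmas)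
          have hpairs : pvPairsGo none none 0 ('<' :: r)
              = ((0 + (u.length : Int)), (0 + (u.length : Int) + 1 + (m.length : Int)))
                  :: (pvPairsGo none none 0 y).map
                      (fun ab => (ab.1 + (0 + (u.length : Int) + 1 + (m.length : Int) + 1),
                                  ab.2 + (0 + (u.length : Int) + 1 + (m.length : Int) + 1))) := by
            rw [hlEq, pvPairs_thruU u _ none 0 hu, pvPairs_thruM m _ _ _ hmm, pvPairs_emit,
              pvPairs_shift0 y]
          rw [hpairs, List.map_cons]
          simp only [pvSpliceGo]
          have hwl : w ++ '<' :: r = (w ++ u) ++ ('<' :: (m ++ '>' :: y)) := by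
            rw [hlEq]; simp
          have hsliceL :
              PySem.List.slice (w ++ '<' :: r) none
                  (some (0 + (u.length : Int) + ((w.length : Int) + adj) - adj)) = w ++ u := by
            rw [show 0 + (u.length : Int) + ((w.length : Int) + adj) - adj
                = ((w.length + u.length : Nat) : Int) by push_cast; ring,
              PySem.List.slice_to_natCast, hwl, List.take_left' (by simp)]
          have hsliceR :
              PySem.List.slice (w ++ '<' :: r)
                  (some (0 + (u.length : Int) + 1 + (m.length : Int) + ((w.length : Int) + adj)
                          - adj + 1)) none = y := by
            rw [show 0 + (u.length : Int) + 1 + (m.length : Int) + ((w.length : Int) + adj)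
                  - adj + 1 = ((w.length + u.length + m.length + 2 : Nat) : Int) by
                push_cast; ring,
              PySem.List.slice_from_natCast,
              show w ++ '<' :: r = ((w ++ u) ++ '<' :: m ++ ['>']) ++ y by rw [hlEq]; simp,
              List.drop_left' (by simp; omega)]
          rw [hsliceL, hsliceR]
          have hstep := ih y hleny hbady ((w ++ u) ++ [' '])
            (adj + (0 + (u.length : Int) + 1 + (m.length : Int) + ((w.length : Int) + adj)
                      - (0 + (u.length : Int) + ((w.length : Int) + adj))))
          have hmap : ((pvPairsGo none none 0 y).map
                (fun ab => (ab.1 + (0 + (u.length : Int) + 1 + (m.length : Int) + 1),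
                            ab.2 + (0 + (u.length : Int) + 1 + (m.length : Int) + 1)))).map
                (fun ab => (ab.1 + ((w.length : Int) + adj), ab.2 + ((w.length : Int) + adj)))
              = (pvPairsGo none none 0 y).map
                (fun ab => (ab.1 + ((((w ++ u) ++ [' ']).length : Int)
                      + (adj + (0 + (u.length : Int) + 1 + (m.length : Int)
                            + ((w.length : Int) + adj)
                            - (0 + (u.length : Int) + ((w.length : Int) + adj))))),
                            ab.2 + ((((w ++ u) ++ [' ']).length : Int)
                      + (adj + (0 + (u.length : Int) + 1 + (m.length : Int)
                            + ((w.length : Int) + adj)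
                            - (0 + (u.length : Int) + ((w.length : Int) + adj))))))) := by
            rw [List.map_map]
            refine List.map_congr_left ?_
            intro ab _
            simp only [Function.comp_apply, List.length_append, List.length_cons,
              List.length_nil]
            simp only [Prod.mk.injEq]
            constructor <;> (push_cast [List.length_nil, List.length_cons, List.length_append]; ring)
          rw [hmap]
          rw [show (w ++ u) ++ [' '] ++ y = (w ++ u) ++ (' ' :: y) by simp] at hstep
          rw [show (w ++ u) ++ (' ' :: y) = w ++ u ++ [' '] ++ y by simp] at hstep
          rw [hstep]
          -- the B side
          rw [hlEq, pvAlt_split u m y hu hmm]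
          simp
        · -- '<' with no later '>': nothing is removed
          have hnoGt : '>' ∉ '<' :: r := by
            intro hmem
            rcases List.mem_cons.mp hmem with h | h
            · exact absurd h (by decide)
            · exact hg h
          have hpairs : pvPairsGo none none 0 ('<' :: r) = [] := by
            have h0 : pvPairsGo none none 0 ('<' :: r) = pvPairsGo (some 0) none 1 r := by
              simp [pvPairsGo]
            rw [h0, pvPairs_noGt r _ _ hg]
          rw [hpairs]
          simp only [List.map_nil, pvSpliceGo]
          have := pvAlt_noGt ('<' :: r) [] none hnoGt
          rw [this]
          simp [pvFlush]
      · by_cases hgt : c = '>'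
        · -- leading stray '>': by ¬bad there is no '<' at all in r
          subst hgt
          have hnl : '<' ∉ r := pvBad_gt hbad
          have hpairs : pvPairsGo none none 0 ('>' :: r) = [] := by
            have h0 : pvPairsGo none none 0 ('>' :: r) = pvPairsGo none (some 0) 1 r := by
              simp [pvPairsGo]
            rw [h0, pvPairs_noLt r _ _ hnl]
          rw [hpairs]
          simp only [List.map_nil, pvSpliceGo]
          have hnl' : '<' ∉ '>' :: r := by
            intro hmem
            rcases List.mem_cons.mp hmem with h | h
            · exact absurd h (by decide)
            · exact hnl h
          rw [pvAlt_noLt ('>' :: r) [] hnl']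
          simp [pvFlush]
        · -- non-bracket head: shift everything by one
          have hbadr : ¬ pvBadL r := pvBad_nb hbad hlt hgt
          have hlenr : r.length ≤ n := by simp at hl; omega
          have hpairs : pvPairsGo none none 0 (c :: r)
              = (pvPairsGo none none 0 r).map (fun ab => (ab.1 + 1, ab.2 + 1)) := by
            have h0 : pvPairsGo none none 0 (c :: r) = pvPairsGo none none 1 r := by
              simp [pvPairsGo, hlt, hgt]
            rw [h0, pvPairs_shift0 r 1]
          rw [hpairs, List.map_map]
          have hmap : ((pvPairsGo none none 0 r).map
                ((fun ab => (ab.1 + ((w.length : Int) + adj), ab.2 + ((w.length : Int) + adj)))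
                  ∘ (fun (ab : Int × Int) => (ab.1 + 1, ab.2 + 1))))
              = (pvPairsGo none none 0 r).map
                (fun ab => (ab.1 + (((w ++ [c]).length : Int) + adj),
                            ab.2 + (((w ++ [c]).length : Int) + adj))) := by
            refine List.map_congr_left ?_
            intro ab _
            simp only [Function.comp_apply, List.length_append, List.length_cons]
            simp only [Prod.mk.injEq]
            constructor <;> (push_cast [List.length_nil, List.length_cons, List.length_append]; ring)
          rw [hmap]
          have hstep := ih r hlenr hbadr (w ++ [c]) adj
          rw [show (w ++ [c]) ++ r = w ++ c :: r by simp] at hstep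
          rw [hstep]
          -- B side: the head is copied
          rw [List.foldl_cons, show pvStep ([], none) c = ([c], none) by simp [pvStep, hlt, hgt]]
          cases hY : r.foldl pvStep ([], none) with
          | mk y1 y2 =>
            rw [pvFold_front r [c] none, hY]
            simp only [pvFlush_front]
            simp

theorem main_eq (l : List Char) (h : ¬ pvBadL l) :
    (if (pvPairsGo none none 0 l).length > 0 then pvSpliceGo l 0 (pvPairsGo none none 0 l) else l)
      = pvFlush (l.foldl pvStep ([], none)) := by
  have hm := main_lemma l.length l (le_refl _) h [] 0
  simp only [List.nil_append, List.length_nil, Nat.cast_zero, add_zero] at hm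
  have hid : (pvPairsGo none none 0 l).map (fun (ab : Int × Int) => (ab.1, ab.2))
      = pvPairsGo none none 0 l := by
    simp
  rw [hid] at hm
  split_ifs with hlen
  · exact hm
  · have hnil : pvPairsGo none none 0 l = [] := by
      cases hp : pvPairsGo none none 0 l with
      | nil => rfl
      | cons a ps => rw [hp] at hlen; simp at hlen
    rw [hnil] at hm
    simpa [pvSpliceGo] using hm

-- ===== VERDICT (by name: the statement is the Claim_ definition above) =====
theorem remove_bracket_text_spec : Claim_unchanged_remove_bracket_text := by
  intro s _hdom hD
  have h : ¬ pvBadL s.toList := hD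
  unfold remove_bracket_text remove_bracket_text_alt
  exact congrArg String.ofList (main_eq s.toList h)

theorem remove_bracket_text_changed : Claim_changed_remove_bracket_text := by
  unfold Claim_changed_remove_bracket_text; decide
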